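-- pv_equiv track=rewrite | github.com/wzygxr/shuati | class147_DynamicProgrammingAndGameTheory/Code02_EatGrass.py | can_win_dp
-- ===== SOURCE A (Python) =====
-- def can_win_dp(n: int) -> str:
--     """
--     动态规划解法
--
--     解题思路：
--     自底向上计算每个状态的胜负情况：
--     1. 如果能直接吃完草，则当前玩家获胜
--     2. 如果存在一种吃草策略能让对手必败，则当前玩家必胜
--
--     时间复杂度：O(n)
--     空间复杂度：O(n)
--
--     优缺点分析：
--     优点：思路清晰，适用于展示DP在博弈问题中的应用
--     缺点：时间空间复杂度较高
--
--     适用场景：展示DP在博弈问题中的应用，教学演示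
--     """
--     # 边界条件：没有草时，后手赢
--     if n == 0:
--         return "B"  # 没有草时，后手赢
--
--     # 创建dp数组，dp[i]表示先手是否能赢
--     dp = [False] * (n + 1)  # dp[i]表示先手是否能赢
--
--     # 基础情况
--     if n >= 1:
--         dp[1] = True  # 只有1棵草，先手赢
--     if n >= 4:
--         dp[4] = True  # 只有4棵草，先手赢
--     if n >= 16:
--         dp[16] = True  # 只有16棵草，先手赢
--
--     # 自底向上计算每个状态的胜负
--     for i in range(2, n + 1):
--         # 如果当前状态可以转移到必败状态，则当前状态是必胜状态
--         # 尝试吃1棵草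
--         if i >= 1 and not dp[i - 1]:
--             dp[i] = True
--         # 尝试吃4棵草
--         if i >= 4 and not dp[i - 4]:
--             dp[i] = True
--         # 尝试吃16棵草
--         if i >= 16 and not dp[i - 16]:
--             dp[i] = True
--
--     # 返回结果：如果先手能赢返回"A"，否则返回"B"
--     return "A" if dp[n] else "B"
-- ===== SOURCE B (Python) =====
-- def can_win_dp(n: int) -> str:
--     # Closed form: the take-1/4/16 game is periodic with period 5;
--     # the second player wins exactly when n % 5 is 0 or 2.
--     return "B" if n % 5 in (0, 2) else "A"
-- ===== Notes on version B (the rewrite author's own statement) =====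
-- stated objective: faster
-- what changed: Replaced the O(n) bottom-up DP table with the closed-form periodicity of the game: the second player wins iff n % 5 is 0 or 2.
import Mathlib
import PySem

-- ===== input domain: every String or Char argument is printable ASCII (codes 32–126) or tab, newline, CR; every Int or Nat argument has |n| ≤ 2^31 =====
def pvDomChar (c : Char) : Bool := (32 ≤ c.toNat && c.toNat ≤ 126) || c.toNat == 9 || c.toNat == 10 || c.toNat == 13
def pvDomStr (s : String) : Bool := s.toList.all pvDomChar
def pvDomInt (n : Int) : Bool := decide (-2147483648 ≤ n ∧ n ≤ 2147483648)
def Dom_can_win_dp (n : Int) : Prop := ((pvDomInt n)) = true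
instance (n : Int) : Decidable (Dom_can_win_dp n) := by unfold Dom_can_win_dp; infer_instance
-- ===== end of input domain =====

-- B replaces A's O(n) bottom-up DP table with the closed-form period-5 rule ("B" iff n % 5 ∈ {0,2}); objective: faster.

-- ===== PORT A =====
-- one iteration of A's 'for i in range(2, n+1)' loop body; reads dp[i-1]/dp[i-4]/dp[i-16] are
-- guarded (i≥1 / i≥4 / i≥16) and hence always in range, so the total pyGetD/pySetD forms are exact
def pvStepA (dp : List Bool) (i : Int) : List Bool :=
  let dp1 := if 1 ≤ i ∧ PySem.List.pyGetD dp (i - 1) false = false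
             then PySem.List.pySetD dp i true else dp
  let dp2 := if 4 ≤ i ∧ PySem.List.pyGetD dp1 (i - 4) false = false
             then PySem.List.pySetD dp1 i true else dp1
  if 16 ≤ i ∧ PySem.List.pyGetD dp2 (i - 16) false = false
  then PySem.List.pySetD dp2 i true else dp2

def can_win_dp (n : Int) : String :=
  if n = 0 then "B"
  else
    let dp := List.replicate (n + 1).toNat false
    let dp := if 1 ≤ n then PySem.List.pySetD dp 1 true else dp
    let dp := if 4 ≤ n then PySem.List.pySetD dp 4 true else dp
    let dp := if 16 ≤ n then PySem.List.pySetD dp 16 true else dp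
    let dp := (PySem.List.pyRange 2 (n + 1) 1).foldl pvStepA dp
    if PySem.List.pyGetD dp n false = true then "A" else "B"

-- ===== PORT B =====
def can_win_dp_alt (n : Int) : String :=
  if PySem.Int.mod n 5 = 0 ∨ PySem.Int.mod n 5 = 2 then "B" else "A"

-- ===== PRECONDITION & SPEC =====
-- Pre_ excludes n < 0, on which A raises IndexError (dp[n] on the empty list [False]*(n+1)).
def Pre_can_win_dp (n : Int) : Prop := 0 ≤ n
instance (n : Int) : Decidable (Pre_can_win_dp n) := by unfold Pre_can_win_dp; infer_instance
def pvWitness_can_win_dp : Int := (7)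

def Spec_can_win_dp (n : Int) (out : String) : Prop := out = can_win_dp_alt n
instance (n : Int) (out : String) : Decidable (Spec_can_win_dp n out) := by unfold Spec_can_win_dp; infer_instance

-- ===== CLAIM (what is proved, stated in full; the proofs are below) =====
def Claim_equal_can_win_dp : Prop := ∀ (n : Int), Dom_can_win_dp n → Pre_can_win_dp n → Spec_can_win_dp n (can_win_dp n)

-- ===== LEMMAS AND PROOFS =====

-- winner table of the game (first player wins iff n % 5 ∈ {1,3,4}) and A's preset positions
def pvWin (j : Nat) : Bool := j % 5 == 1 || j % 5 == 3 || j % 5 == 4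
def pvPreset (j : Nat) : Bool := j == 1 || j == 4 || j == 16

-- the preset dp list A builds before its loop (definitionally the lets in can_win_dp)
def pvInit (n : Int) : List Bool :=
  let dp := List.replicate (n + 1).toNat false
  let dp := if 1 ≤ n then PySem.List.pySetD dp 1 true else dp
  let dp := if 4 ≤ n then PySem.List.pySetD dp 4 true else dp
  if 16 ≤ n then PySem.List.pySetD dp 16 true else dp

-- loop invariant: after processing i = 2..k the table holds pvWin at 0..k and the presets above k
def pvInv (n : Int) (k : Nat) (dp : List Bool) : Prop :=
  dp.length = (n + 1).toNat ∧
  ∀ j : Nat, j < (n + 1).toNat → dp.getD j false = if j ≤ k then pvWin j else pvPreset j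

lemma pv_getD_set (l : List Bool) (a j : Nat) (v d : Bool) (ha : a < l.length) :
    (l.set a v).getD j d = if j = a then v else l.getD j d := by
  simp only [List.getD_eq_getElem?_getD, List.getElem?_set]
  split_ifs with h1 h2 h2
  · simp
  · omega
  · subst h2; omega
  · rfl

lemma pvStepA_length (dp : List Bool) (i : Int) : (pvStepA dp i).length = dp.length := by
  simp only [pvStepA]
  split_ifs <;> simp [PySem.List.length_pySetD]

lemma pvStepA_getD (dp : List Bool) (m j : Nat) (hm : 2 ≤ m) (hmL : m < dp.length) :
    (pvStepA dp (m : Int)).getD j false =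
      if j = m then
        (dp.getD m false || !dp.getD (m-1) false
          || (decide (4 ≤ m) && !dp.getD (m-4) false)
          || (decide (16 ≤ m) && !dp.getD (m-16) false))
      else dp.getD j false := by
  have e1 : (m:Int) - 1 = ((m-1:Nat):Int) := by omega
  have c1 : (1:Int) ≤ (m:Int) := by omega
  simp only [pvStepA, e1, PySem.List.pyGetD_natCast, PySem.List.pySetD_natCast, c1, true_and]
  have ne1 : ¬ (m = m - 1) := by omega
  by_cases h4 : 4 ≤ m <;> by_cases h16 : 16 ≤ m <;> [skip; skip; omega; skip]
  · have e4 : (m:Int) - 4 = ((m-4:Nat):Int) := by omega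
    have e16 : (m:Int) - 16 = ((m-16:Nat):Int) := by omega
    have c4 : (4:Int) ≤ (m:Int) := by omega
    have c16 : (16:Int) ≤ (m:Int) := by omega
    simp only [e4, e16, c4, c16, true_and, PySem.List.pyGetD_natCast, h4, h16, decide_true,
      Bool.true_and]
    have ne4 : ¬ (m = m - 4) := by omega
    have ne16 : ¬ (m = m - 16) := by omega
    split_ifs with g1 g2 g3 g2 g3 g3 <;>
      simp_all [List.getD_eq_getElem?_getD, List.getElem?_set] <;>
      first
        | (split_ifs <;> simp_all)
        | simp [List.getElem?_set_ne (by omega : ¬ m = j)]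
  · have e4 : (m:Int) - 4 = ((m-4:Nat):Int) := by omega
    have c4 : (4:Int) ≤ (m:Int) := by omega
    have nc16 : ¬ ((16:Int) ≤ (m:Int)) := by omega
    simp only [e4, c4, true_and, PySem.List.pyGetD_natCast, h4, h16, decide_true, decide_false,
      Bool.true_and, Bool.false_and, Bool.or_false, nc16, false_and, if_false]
    have ne4 : ¬ (m = m - 4) := by omega
    split_ifs with g1 g2 g2 <;>
      simp_all [pv_getD_set, List.length_set] <;>
      first
        | (split_ifs <;> simp_all)
        | simp [List.getElem?_set_ne (by omega : ¬ m = j)]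
  · have nc4 : ¬ ((4:Int) ≤ (m:Int)) := by omega
    have nc16 : ¬ ((16:Int) ≤ (m:Int)) := by omega
    simp only [h4, h16, decide_false, Bool.false_and, Bool.or_false, nc16, nc4, false_and,
      if_false]
    by_cases hj : j = m
    · subst hj
      rw [if_pos rfl]
      split_ifs with g1
      · rw [pv_getD_set _ _ _ _ _ hmL, if_pos rfl]
        rw [List.getD_eq_getElem?_getD] at g1
        simp [g1]
      · simp only [Bool.not_eq_false] at g1
        rw [List.getD_eq_getElem?_getD] at g1
        simp [g1]
    · rw [if_neg hj]
      split_ifs with g1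
      · rw [pv_getD_set _ _ _ _ _ hmL, if_neg hj]
      · rfl

-- the closed-form table satisfies exactly A's loop recurrence
lemma pvWin_rec (m : Nat) (hm : 2 ≤ m) :
    pvWin m = (pvPreset m || !pvWin (m-1)
      || (decide (4 ≤ m) && !pvWin (m-4))
      || (decide (16 ≤ m) && !pvWin (m-16))) := by
  by_cases h4 : 4 ≤ m <;> by_cases h16 : 16 ≤ m <;> [skip; skip; omega; skip]
  · have hr : m % 5 = 0 ∨ m % 5 = 1 ∨ m % 5 = 2 ∨ m % 5 = 3 ∨ m % 5 = 4 := by omega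
    rcases hr with h | h | h | h | h <;>
      simp [pvWin, pvPreset, h, h4, h16,
        (show (m-1) % 5 = (m % 5 + 4) % 5 by omega),
        (show (m-4) % 5 = (m % 5 + 1) % 5 by omega),
        (show (m-16) % 5 = (m % 5 + 4) % 5 by omega)] <;>
      omega
  · interval_cases m <;> decide
  · interval_cases m <;> decide

lemma pv_init_inv (n : Int) (hn : 1 ≤ n) : pvInv n 1 (pvInit n) := by
  constructor
  · simp only [pvInit]
    split_ifs <;> simp [PySem.List.length_pySetD]
  · intro j hj
    simp only [pvInit, if_pos hn]
    rw [PySem.List.pySetD_of_nonneg _ true (by norm_num : (0:Int) ≤ 1)]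
    by_cases h4 : 4 ≤ n <;> by_cases h16 : 16 ≤ n <;> [skip; skip; omega; skip]
    · rw [if_pos h4, if_pos h16,
        PySem.List.pySetD_of_nonneg _ true (by norm_num : (0:Int) ≤ 4),
        PySem.List.pySetD_of_nonneg _ true (by norm_num : (0:Int) ≤ 16)]
      simp only [show ((1:Int)).toNat = 1 from rfl, show ((4:Int)).toNat = 4 from rfl, show ((16:Int)).toNat = 16 from rfl]
      rw [pv_getD_set _ _ _ _ _ (by simp; omega),
        pv_getD_set _ _ _ _ _ (by simp; omega),
        pv_getD_set _ _ _ _ _ (by simp; omega)]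
      simp only [List.getD_eq_getElem?_getD, List.getElem?_replicate, hj, if_pos]
      split_ifs <;> simp_all [pvWin, pvPreset] <;> omega
    · rw [if_pos h4, if_neg h16,
        PySem.List.pySetD_of_nonneg _ true (by norm_num : (0:Int) ≤ 4)]
      simp only [show ((1:Int)).toNat = 1 from rfl, show ((4:Int)).toNat = 4 from rfl, show ((16:Int)).toNat = 16 from rfl]
      rw [pv_getD_set _ _ _ _ _ (by simp; omega),
        pv_getD_set _ _ _ _ _ (by simp; omega)]
      simp only [List.getD_eq_getElem?_getD, List.getElem?_replicate, hj, if_pos]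
      split_ifs <;> simp_all [pvWin, pvPreset] <;> omega
    · rw [if_neg h4, if_neg h16]
      simp only [show ((1:Int)).toNat = 1 from rfl]
      rw [pv_getD_set _ _ _ _ _ (by simp; omega)]
      simp only [List.getD_eq_getElem?_getD, List.getElem?_replicate, hj, if_pos]
      split_ifs <;> simp_all [pvWin, pvPreset] <;> omega

lemma pv_step_inv (n : Int) (k : Nat) (dp : List Bool) (hk : 1 ≤ k)
    (hkn : (k : Int) + 1 ≤ n) (h : pvInv n k dp) :
    pvInv n (k + 1) (pvStepA dp ((k : Int) + 1)) := by
  obtain ⟨hlen, hval⟩ := h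
  have hcast : ((k:Int) + 1) = ((k + 1 : Nat) : Int) := by push_cast; ring
  rw [hcast]
  have hm2 : 2 ≤ k + 1 := by omega
  have hmL : k + 1 < dp.length := by rw [hlen]; omega
  constructor
  · rw [pvStepA_length, hlen]
  · intro j hj
    rw [pvStepA_getD dp (k+1) j hm2 hmL]
    by_cases hj2 : j = k + 1
    · subst hj2
      rw [if_pos rfl, if_pos (le_refl _)]
      rw [hval (k+1) hj, hval (k+1-1) (by omega), hval (k+1-4) (by omega),
        hval (k+1-16) (by omega)]
      rw [if_neg (by omega), if_pos (by omega), if_pos (by omega), if_pos (by omega)]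
      exact (pvWin_rec (k+1) hm2).symm
    · rw [if_neg hj2, hval j hj]
      split_ifs <;> first | rfl | omega

lemma pv_fold_inv (n : Int) (hn : 1 ≤ n) (k : Nat) (hk : 1 ≤ k) (hkn : (k : Int) ≤ n) :
    pvInv n k ((PySem.List.pyRange 2 ((k : Int) + 1) 1).foldl pvStepA (pvInit n)) := by
  induction k with
  | zero => omega
  | succ m ih =>
    by_cases hm : 1 ≤ m
    · have hmn : (m : Int) ≤ n := by push_cast at hkn ⊢; omega
      have hsplit : PySem.List.pyRange 2 ((m : Int) + 1 + 1) 1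
          = PySem.List.pyRange 2 ((m : Int) + 1) 1 ++ [(m : Int) + 1] := by
        exact PySem.List.pyRange_one_succ_right (by push_cast; omega)
      have e : ((m + 1 : Nat) : Int) + 1 = ((m : Int) + 1 + 1) := by push_cast; ring
      rw [e, hsplit, List.foldl_append]
      simpa using pv_step_inv n m _ hm (by push_cast at hkn ⊢; omega) (ih hm hmn)
    · have hm1 : m = 0 := by omega
      subst hm1
      simpa [PySem.List.pyRange_one_eq_nil] using pv_init_inv n hn

theorem can_win_dp_spec : Claim_equal_can_win_dp := by
  intro n _ hpre
  unfold Spec_can_win_dp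
  by_cases hn0 : n = 0
  · subst hn0; decide
  · have hn : 1 ≤ n := by unfold Pre_can_win_dp at hpre; omega
    set m : Nat := n.toNat with hm
    have hnm : n = (m : Int) := by omega
    have hm1 : 1 ≤ m := by omega
    have key : can_win_dp n
        = (if PySem.List.pyGetD ((PySem.List.pyRange 2 (n + 1) 1).foldl pvStepA (pvInit n)) n false
              = true
           then "A" else "B") := by
      unfold can_win_dp pvInit
      rw [if_neg hn0]
    obtain ⟨hlen, hval⟩ := pv_fold_inv n hn m hm1 (by omega)
    rw [key, hnm] at *
    have hread : PySem.List.pyGetD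
        ((PySem.List.pyRange 2 ((m:Int) + 1) 1).foldl pvStepA (pvInit (m:Int))) (m:Int) false
        = pvWin m := by
      rw [PySem.List.pyGetD_natCast, hval m (by omega), if_pos (le_refl _)]
    rw [hread]
    have hmod : PySem.Int.mod (m:Int) 5 = ((m % 5 : Nat) : Int) := by
      exact_mod_cast PySem.Int.mod_natCast m 5
    unfold can_win_dp_alt
    rw [hmod]
    have hr : m % 5 = 0 ∨ m % 5 = 1 ∨ m % 5 = 2 ∨ m % 5 = 3 ∨ m % 5 = 4 := by omega
    rcases hr with h | h | h | h | h <;> simp [pvWin, h]
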